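-- pv_equiv track=rewrite | github.com/HajianAmirhassan/Dm-Project | Project.py | SplitBinary
-- ===== SOURCE A (Python) =====
-- def SplitBinary(s, max_len=3):
--     def backtrack(start, Current):
--         if start == len(s):
--             result.append(Current[:])
--             return
--
--         for length in range(1, min(max_len + 1, len(s) - start + 1)):
--             substring = s[start:start + length]
--             Current.append(substring)
--             backtrack(start + length, Current)
--             Current.pop()
--
--     result = []
--     backtrack(0, [])
--     return result
-- ===== SOURCE B (Python) =====
-- def SplitBinary(s, max_len=3):
--     n = len(s)
--     splits = [None] * (n + 1)
--     splits[n] = [[]]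
--     for i in range(n - 1, -1, -1):
--         splits[i] = [[s[i:i + l]] + rest
--                      for l in range(1, min(max_len, n - i) + 1)
--                      for rest in splits[i + l]]
--     return splits[0]
-- ===== Notes on version B (the rewrite author's own statement) =====
-- stated objective: alternative
-- what changed: Replaced the top-down accumulator-passing DFS that copies the current path at every leaf by an iterative bottom-up tabulation splits[i] of all splittings of the suffix s[i:], filled from i = n down to 0 and returning splits[0]; computed suffix rows are shared across all prefixes instead of being re-enumerated.
import Mathlib
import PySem

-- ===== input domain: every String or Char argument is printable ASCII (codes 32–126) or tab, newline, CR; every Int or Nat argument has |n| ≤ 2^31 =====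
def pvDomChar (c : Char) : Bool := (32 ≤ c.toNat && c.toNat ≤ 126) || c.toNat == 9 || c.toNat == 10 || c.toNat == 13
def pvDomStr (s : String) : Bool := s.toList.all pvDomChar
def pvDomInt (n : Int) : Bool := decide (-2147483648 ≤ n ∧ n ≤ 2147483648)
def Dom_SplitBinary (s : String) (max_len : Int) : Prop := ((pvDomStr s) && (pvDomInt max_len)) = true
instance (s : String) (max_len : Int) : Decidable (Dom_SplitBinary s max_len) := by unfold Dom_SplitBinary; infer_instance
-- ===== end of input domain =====

-- B replaces A's path-copying DFS by an iterative bottom-up suffix tabulation; return values proved equal.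

-- ===== PORT A =====
-- A's recursive backtrack(start, Current): appending to the mutable `result` in order
-- is modeled by flatMap over the loop's lengths; `Current[:]` copying is value semantics.
def SplitBinaryAux (cs : List Char) (maxLen : Int) (start : Int) (cur : List String) :
    List (List String) :=
  if start = (cs.length : Int) then [cur]
  else
    (PySem.List.pyRange 1 (min (maxLen + 1) ((cs.length : Int) - start + 1)) 1).attach.flatMap
      (fun ⟨l, hl⟩ =>
        SplitBinaryAux cs maxLen (start + l)
          (cur ++ [String.ofList (PySem.Chars.slice cs (some start) (some (start + l)))]))
termination_by ((cs.length : Int) - start).toNat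
decreasing_by
  rename_i h
  have := (PySem.List.mem_pyRange_one.mp hl)
  omega

def SplitBinary (s : String) (max_len : Int) : List (List String) :=
  SplitBinaryAux s.toList max_len 0 []

-- ===== PORT B =====
-- one table row: splits[i] = [[s[i:i+l]] + rest for l in 1..min(max_len, n-i) for rest in splits[i+l]];
-- `tab` holds the already-computed rows splits[i+1], splits[i+2], …, so splits[i+l] is tab[l-1]
def SplitBinaryRow (cs : List Char) (maxLen : Int) (i : Int)
    (tab : List (List (List String))) : List (List String) :=
  (PySem.List.pyRange 1 (min maxLen ((cs.length : Int) - i) + 1) 1).flatMap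
    (fun l =>
      (PySem.List.pyGetD tab (l - 1) []).map
        (fun rest => String.ofList (PySem.Chars.slice cs (some i) (some (i + l))) :: rest))

def SplitBinary_alt (s : String) (max_len : Int) : List (List String) :=
  let cs := s.toList
  let tab :=
    (PySem.List.pyRange ((cs.length : Int) - 1) (-1) (-1)).foldl
      (fun tab i => SplitBinaryRow cs max_len i tab :: tab) [[[]]]
  tab.headD []

-- ===== PRECONDITION & SPEC =====
def Spec_SplitBinary (s : String) (max_len : Int) (out : List (List String)) : Prop := out = SplitBinary_alt s max_len
instance (s : String) (max_len : Int) (out : List (List String)) : Decidable (Spec_SplitBinary s max_len out) := by unfold Spec_SplitBinary; infer_instance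

-- ===== CLAIM (what is proved, stated in full; the proofs are below) =====
def Claim_equal_SplitBinary : Prop := ∀ (s : String) (max_len : Int), Dom_SplitBinary s max_len → Spec_SplitBinary s max_len (SplitBinary s max_len)

-- ===== LEMMAS AND PROOFS =====

-- The common mathematical value: all splittings of the suffix cs[i:]
def suff (cs : List Char) (maxLen : Int) (i : Nat) : List (List String) :=
  if h : cs.length <= i then [[]]
  else
    (List.range (min maxLen.toNat (cs.length - i))).attach.flatMap
      (fun ⟨k, _⟩ =>
        (suff cs maxLen (i + k + 1)).map
          (fun rest => String.ofList ((cs.drop i).take (k + 1)) :: rest))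
termination_by cs.length - i
decreasing_by omega

theorem suff_of_ge (cs : List Char) (maxLen : Int) (i : Nat) (h : cs.length <= i) :
    suff cs maxLen i = [[]] := by
  rw [suff]; simp [h]

theorem suff_of_lt (cs : List Char) (maxLen : Int) (i : Nat) (h : i < cs.length) :
    suff cs maxLen i =
      (List.range (min maxLen.toNat (cs.length - i))).flatMap
        (fun k =>
          (suff cs maxLen (i + k + 1)).map
            (fun rest => String.ofList ((cs.drop i).take (k + 1)) :: rest)) := by
  rw [suff]
  rw [dif_neg (by omega)]
  simp only [List.flatMap_subtype, List.unattach_attach]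

theorem pieceA_eq (cs : List Char) (i k : Nat) :
    PySem.Chars.slice cs (some (i : Int)) (some ((i : Int) + (1 + (k : Int)))) =
      (cs.drop i).take (k + 1) := by
  have h1 : (i : Int) + (1 + (k : Int)) = (i : Int) + ((k + 1 : Nat) : Int) := by push_cast; ring
  rw [h1]
  simp only [PySem.Chars.slice]
  rw [PySem.List.slice_natCast_add]

theorem A_eq (cs : List Char) (maxLen : Int) (i : Nat) (hi : i <= cs.length)
    (cur : List String) :
    SplitBinaryAux cs maxLen (i : Int) cur = (suff cs maxLen i).map (cur ++ ·) := by
  by_cases h : i = cs.length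
  · subst h
    rw [SplitBinaryAux, if_pos rfl, suff_of_ge cs maxLen _ le_rfl]
    simp
  · have hlt : i < cs.length := by omega
    rw [SplitBinaryAux, if_neg (by omega), suff_of_lt cs maxLen i hlt]
    simp only [List.flatMap_subtype, List.unattach_attach]
    rw [PySem.List.pyRange_one]
    have hsub : (min (maxLen + 1) ((cs.length : Int) - (i : Int) + 1) - 1).toNat
        = min maxLen.toNat (cs.length - i) := by omega
    rw [hsub, List.flatMap_map, List.map_flatMap]
    apply List.flatMap_congr
    intro k hk
    have hkN : k < min maxLen.toNat (cs.length - i) := List.mem_range.mp hk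
    have hle : i + k + 1 <= cs.length := by omega
    have hcast : (i : Int) + (1 + (k : Int)) = ((i + k + 1 : Nat) : Int) := by push_cast; ring
    rw [hcast, A_eq cs maxLen (i + k + 1) hle, ← hcast, pieceA_eq]
    rw [List.map_map]
    apply List.map_congr_left
    intro r _
    simp
termination_by cs.length - i

def tabOf (cs : List Char) (maxLen : Int) (i : Nat) : List (List (List String)) :=
  (List.range (cs.length - i + 1)).map (fun j => suff cs maxLen (i + j))

theorem tabOf_cons (cs : List Char) (maxLen : Int) (m : Nat) (hm : m < cs.length) :
    tabOf cs maxLen m = suff cs maxLen m :: tabOf cs maxLen (m + 1) := by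
  unfold tabOf
  have hlen : cs.length - m + 1 = (cs.length - (m + 1) + 1) + 1 := by omega
  rw [hlen, List.range_succ_eq_map, List.map_cons, List.map_map]
  refine congrArg₂ List.cons (by rw [Nat.add_zero]) ?_
  apply List.map_congr_left
  intro j _
  show suff cs maxLen (m + (j + 1)) = suff cs maxLen (m + 1 + j)
  congr 1
  omega

theorem row_eq (cs : List Char) (maxLen : Int) (i : Nat) (hi : i < cs.length) :
    SplitBinaryRow cs maxLen (i : Int) (tabOf cs maxLen (i + 1)) = suff cs maxLen i := by
  rw [SplitBinaryRow, suff_of_lt cs maxLen i hi]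
  rw [PySem.List.pyRange_one]
  have hsub : (min maxLen ((cs.length : Int) - (i : Int)) + 1 - 1).toNat
      = min maxLen.toNat (cs.length - i) := by omega
  rw [hsub, List.flatMap_map]
  apply List.flatMap_congr
  intro k hk
  have hkN : k < min maxLen.toNat (cs.length - i) := List.mem_range.mp hk
  have hidx : (1 + (k : Int) - 1) = ((k : Nat) : Int) := by omega
  have hget : PySem.List.pyGetD (tabOf cs maxLen (i + 1)) ((k : Nat) : Int) []
      = suff cs maxLen (i + k + 1) := by
    rw [PySem.List.pyGetD_natCast]
    unfold tabOf
    have hklen : k < cs.length - (i + 1) + 1 := by omega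
    rw [List.getD_eq_getElem _ _ (by simpa using hklen)]
    simp [Nat.add_assoc, Nat.add_comm 1 k]
  rw [hidx, hget, pieceA_eq]

theorem fold_inv (cs : List Char) (maxLen : Int) (i : Nat) (hi : i <= cs.length) :
    (PySem.List.pyRange ((i : Int) - 1) (-1) (-1)).foldl
        (fun tab j => SplitBinaryRow cs maxLen j tab :: tab) (tabOf cs maxLen i)
      = tabOf cs maxLen 0 := by
  induction i with
  | zero =>
    rw [PySem.List.pyRange_neg_one_eq_nil (by omega)]
    rfl
  | succ m ih =>
    have hm : m < cs.length := by omega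
    have h1 : ((m + 1 : Nat) : Int) - 1 = (m : Int) := by push_cast; ring
    rw [h1, PySem.List.pyRange_neg_one_cons (by omega), List.foldl_cons]
    have hcons : SplitBinaryRow cs maxLen (m : Int) (tabOf cs maxLen (m + 1)) :: tabOf cs maxLen (m + 1)
        = tabOf cs maxLen m := by
      rw [row_eq cs maxLen m hm, tabOf_cons cs maxLen m hm]
    rw [hcons]
    exact ih (by omega)

theorem alt_eq (s : String) (max_len : Int) :
    SplitBinary_alt s max_len = suff s.toList max_len 0 := by
  have hinit : ([[[]]] : List (List (List String))) = tabOf s.toList max_len s.toList.length := by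
    unfold tabOf
    rw [Nat.sub_self, List.range_one, List.map_singleton, Nat.add_zero,
      suff_of_ge s.toList max_len s.toList.length le_rfl]
  show ((PySem.List.pyRange ((s.toList.length : Int) - 1) (-1) (-1)).foldl
      (fun tab i => SplitBinaryRow s.toList max_len i tab :: tab) [[[]]]).headD [] = _
  rw [hinit, fold_inv s.toList max_len s.toList.length le_rfl]
  unfold tabOf
  rw [List.range_succ_eq_map, List.map_cons]
  rfl

-- ===== VERDICT (by name: the statement is the Claim_ definition above) =====
theorem SplitBinary_spec : Claim_equal_SplitBinary := by
  intro s max_len _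
  unfold Spec_SplitBinary SplitBinary
  rw [alt_eq]
  have := A_eq s.toList max_len 0 (Nat.zero_le _) []
  simpa using this
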